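-- pv_equiv track=rewrite | github.com/Marius-U/ea2pulm | ea2puml/cli.py | _csv_or_multi
-- ===== SOURCE A (Python) =====
-- from typing import List
--
-- def _csv_or_multi(values: List[str]) -> List[str]:
--     out: List[str] = []
--     for v in values:
--         if "," in v:
--             out.extend(x.strip() for x in v.split(",") if x.strip())
--         else:
--             s = v.strip()
--             if s:
--                 out.append(s)
--     return out
-- ===== SOURCE B (Python) =====
-- from typing import List
--
-- def _csv_or_multi(values: List[str]) -> List[str]:
--     parts = ",".join(values).split(",")
--     return [s for s in map(str.strip, parts) if s]
-- ===== Notes on version B (the rewrite author's own statement) =====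
-- stated objective: simpler
-- what changed: Replaces the per-value loop with a comma-or-not branch by a single join of all values on ',' followed by one split/strip/filter pass over the concatenated string.
import Mathlib
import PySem

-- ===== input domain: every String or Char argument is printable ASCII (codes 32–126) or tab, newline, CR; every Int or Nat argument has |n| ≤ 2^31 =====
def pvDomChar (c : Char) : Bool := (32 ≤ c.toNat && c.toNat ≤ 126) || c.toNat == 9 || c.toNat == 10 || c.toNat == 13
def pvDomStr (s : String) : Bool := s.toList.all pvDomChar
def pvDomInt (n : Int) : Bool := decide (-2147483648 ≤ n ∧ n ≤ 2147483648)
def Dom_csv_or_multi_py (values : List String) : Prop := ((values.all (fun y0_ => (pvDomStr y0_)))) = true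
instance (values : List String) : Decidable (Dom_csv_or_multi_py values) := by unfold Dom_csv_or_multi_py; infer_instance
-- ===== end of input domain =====

-- B replaces A's per-value comma-or-not branching by joining all values on ',' and one split/strip/filter pass (objective: simpler).

-- ===== PORT A =====
-- for v in values: if "," in v: out.extend(x.strip() for x in v.split(",") if x.strip()) else: s = v.strip(); if s: out.append(s)
def csv_or_multi_py (values : List String) : List String :=
  values.foldl (fun out v =>
    if PySem.Str.isIn "," v then
      out ++ (((PySem.Str.split? v ",").getD []).filter
                (fun x => PySem.Str.strip x ≠ "")).map PySem.Str.strip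
    else
      let s := PySem.Str.strip v
      if s ≠ "" then out ++ [s] else out) []

-- ===== PORT B =====
-- parts = ",".join(values).split(","); return [s for s in map(str.strip, parts) if s]
def csv_or_multi_py_alt (values : List String) : List String :=
  let parts := (PySem.Str.split? (PySem.Str.join "," values) ",").getD []
  (parts.map PySem.Str.strip).filter (fun s => s ≠ "")

-- ===== PRECONDITION & SPEC =====
def Spec_csv_or_multi_py (values : List String) (out : List String) : Prop := out = csv_or_multi_py_alt values
instance (values : List String) (out : List String) : Decidable (Spec_csv_or_multi_py values out) := by unfold Spec_csv_or_multi_py; infer_instance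

-- ===== CLAIM (what is proved, stated in full; the proofs are below) =====
def Claim_equal_csv_or_multi_py : Prop := ∀ (values : List String), Dom_csv_or_multi_py values → Spec_csv_or_multi_py values (csv_or_multi_py values)

-- ===== LEMMAS AND PROOFS =====

-- reference single-character splitter: sp c l = l.split(c) in Python terms
def sp (c : Char) : List Char → List (List Char)
  | [] => [[]]
  | a :: rest =>
    if a = c then [] :: sp c rest
    else
      match sp c rest with
      | [] => [[a]]
      | x :: xs => (a :: x) :: xs

theorem sp_ne_nil (c : Char) (l : List Char) : sp c l ≠ [] := by
  cases l with
  | nil => simp [sp]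
  | cons a rest =>
    simp only [sp]
    split
    · simp
    · split <;> simp

theorem go_eq (c : Char) : ∀ (fuel : Nat) (l cur : List Char) (accs : List (List Char)),
    l.length ≤ fuel →
    PySem.Chars.splitOn.go [c] fuel l cur accs.reverse =
      accs ++ (match sp c l with
               | [] => []
               | x :: xs => (cur.reverse ++ x) :: xs) := by
  intro fuel
  induction fuel with
  | zero =>
    intro l cur accs h
    have hl : l = [] := List.length_eq_zero_iff.mp (Nat.le_zero.mp h)
    subst hl
    simp [PySem.Chars.splitOn.go, sp]
  | succ n ih =>
    intro l cur accs h
    cases l with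
    | nil => simp [PySem.Chars.splitOn.go, sp]
    | cons a rest =>
      by_cases hac : a = c
      · subst hac
        have hpre : List.isPrefixOf [a] (a :: rest) = true := by
          simp [List.isPrefixOf]
        rw [show PySem.Chars.splitOn.go [a] (n+1) (a :: rest) cur accs.reverse
              = PySem.Chars.splitOn.go [a] n rest [] (cur.reverse :: accs.reverse) from by
            simp [PySem.Chars.splitOn.go, hpre]]
        have : (cur.reverse :: accs.reverse) = (accs ++ [cur.reverse]).reverse := by simp
        rw [this, ih rest [] (accs ++ [cur.reverse]) (by simpa using Nat.le_of_succ_le_succ h)]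
        simp only [sp, if_true]
        cases hsp : sp a rest with
        | nil => exact absurd hsp (sp_ne_nil a rest)
        | cons x xs => simp
      · have hpre : List.isPrefixOf [c] (a :: rest) = false := by
          simp [List.isPrefixOf]
          exact fun h' => absurd h'.symm hac
        rw [show PySem.Chars.splitOn.go [c] (n+1) (a :: rest) cur accs.reverse
              = PySem.Chars.splitOn.go [c] n rest (a :: cur) accs.reverse from by
            simp [PySem.Chars.splitOn.go, hpre]]
        rw [ih rest (a :: cur) accs (by simpa using Nat.le_of_succ_le_succ h)]
        simp only [sp, if_neg hac]
        cases hsp : sp c rest with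
        | nil => exact absurd hsp (sp_ne_nil c rest)
        | cons x xs => simp

theorem splitOn_eq_sp (c : Char) (l : List Char) :
    PySem.Chars.splitOn l [c] = sp c l := by
  have h := go_eq c (l.length + 1) l [] [] (Nat.le_succ _)
  unfold PySem.Chars.splitOn
  rw [show ([] : List (List Char)) = ([] : List (List Char)).reverse from rfl, h]
  cases hsp : sp c l with
  | nil => exact absurd hsp (sp_ne_nil c l)
  | cons x xs => simp

theorem sp_append_sep (c : Char) (xs ys : List Char) :
    sp c (xs ++ c :: ys) = sp c xs ++ sp c ys := by
  induction xs with
  | nil => simp [sp]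
  | cons a xs ih =>
    by_cases hac : a = c
    · subst hac
      simp [sp, ih]
    · simp only [List.cons_append, sp, if_neg hac, ih]
      cases hsp : sp c xs with
      | nil => exact absurd hsp (sp_ne_nil c xs)
      | cons x xs' => simp

theorem sp_no_sep (c : Char) (v : List Char) (h : c ∉ v) : sp c v = [v] := by
  induction v with
  | nil => simp [sp]
  | cons a rest ih =>
    have hac : a ≠ c := fun h' => h (h' ▸ List.mem_cons_self)
    simp only [sp, if_neg hac, ih (fun h' => h (List.mem_cons_of_mem _ h'))]

theorem sp_intercalate (c : Char) (v : List Char) (vs : List (List Char)) :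
    sp c (List.intercalate [c] (v :: vs)) = (v :: vs).flatMap (sp c) := by
  induction vs generalizing v with
  | nil => simp [List.intercalate]
  | cons w ws ih =>
    have : List.intercalate [c] (v :: w :: ws) = v ++ c :: List.intercalate [c] (w :: ws) := by
      simp [List.intercalate, List.intersperse]
    rw [this, sp_append_sep, ih w]
    simp

-- A's contribution for one value equals B's treatment of that value's comma pieces
theorem step_eq (v : String) :
    (if PySem.Str.isIn "," v then
      (((PySem.Str.split? v ",").getD []).filter
         (fun x => PySem.Str.strip x ≠ "")).map PySem.Str.strip
     else
      let s := PySem.Str.strip v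
      if s ≠ "" then [s] else []) =
    (((sp ',' v.toList).map (fun l => PySem.Str.strip (String.ofList l))).filter
       (fun s => s ≠ "")) := by
  have hsplit : (PySem.Str.split? v ",").getD [] = (sp ',' v.toList).map String.ofList := by
    simp [PySem.Str.split?, PySem.Chars.split?, splitOn_eq_sp]
  by_cases hin : PySem.Str.isIn "," v = true
  · rw [if_pos hin]
    simp [hsplit, List.filter_map, List.map_map, Function.comp_def]
  · rw [if_neg hin]
    have hmem : (',' : Char) ∉ v.toList := by
      rw [PySem.Str.isIn_eq, PySem.Chars.isIn_iff_infix] at hin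
      intro hm
      exact hin ((List.singleton_infix_iff ',' v.toList).mpr hm)
    rw [sp_no_sep ',' v.toList hmem]
    simp only [List.map_cons, List.map_nil, List.filter]
    have : PySem.Str.strip (String.ofList v.toList) = PySem.Str.strip v := by
      simp
    rw [this]
    by_cases hs : PySem.Str.strip v = ""
    · simp [hs]
    · simp [hs]

theorem a_eq_flatMap (values : List String) :
    csv_or_multi_py values =
      values.flatMap (fun v =>
        ((sp ',' v.toList).map (fun l => PySem.Str.strip (String.ofList l))).filter
          (fun s => s ≠ "")) := by
  unfold csv_or_multi_py
  have h : ∀ (acc : List String),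
      values.foldl (fun out v =>
        if PySem.Str.isIn "," v then
          out ++ (((PySem.Str.split? v ",").getD []).filter
                    (fun x => PySem.Str.strip x ≠ "")).map PySem.Str.strip
        else
          let s := PySem.Str.strip v
          if s ≠ "" then out ++ [s] else out) acc =
      acc ++ values.flatMap (fun v =>
        ((sp ',' v.toList).map (fun l => PySem.Str.strip (String.ofList l))).filter
          (fun s => s ≠ "")) := by
    intro acc
    rw [show (fun (out : List String) (v : String) =>
        if PySem.Str.isIn "," v then
          out ++ (((PySem.Str.split? v ",").getD []).filter
                    (fun x => PySem.Str.strip x ≠ "")).map PySem.Str.strip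
        else
          let s := PySem.Str.strip v
          if s ≠ "" then out ++ [s] else out) =
      (fun (out : List String) (v : String) =>
        out ++ ((sp ',' v.toList).map (fun l => PySem.Str.strip (String.ofList l))).filter
          (fun s => s ≠ "")) from ?_]
    · exact PySem.List.foldl_append_eq_flatMap _ values acc
    · funext out v
      rw [← step_eq v]
      by_cases hc : PySem.Str.isIn "," v = true
      · rw [if_pos hc, if_pos hc]
      · rw [if_neg hc, if_neg hc]
        by_cases hd : PySem.Str.strip v = "" <;> simp [hd]
  simpa using h []

theorem b_eq_flatMap (values : List String) :
    csv_or_multi_py_alt values =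
      values.flatMap (fun v =>
        ((sp ',' v.toList).map (fun l => PySem.Str.strip (String.ofList l))).filter
          (fun s => s ≠ "")) := by
  unfold csv_or_multi_py_alt
  have hsplit : (PySem.Str.split? (PySem.Str.join "," values) ",").getD []
      = (sp ',' (PySem.Str.join "," values).toList).map String.ofList := by
    simp [PySem.Str.split?, PySem.Chars.split?, splitOn_eq_sp]
  rw [hsplit]
  cases values with
  | nil =>
    simp [PySem.Str.join, PySem.Chars.join, List.intercalate, sp, PySem.Str.strip,
      PySem.Chars.strip, PySem.Chars.lstrip, PySem.Chars.rstrip]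
  | cons v vs =>
    have hjoin : (PySem.Str.join "," (v :: vs)).toList
        = List.intercalate [','] (v.toList :: vs.map String.toList) := by
      rw [PySem.Str.toList_join]
      rfl
    rw [hjoin, sp_intercalate]
    simp only [List.map_flatMap, List.filter_flatMap]
    simp [List.flatMap_cons, List.map_map, List.flatMap_map, Function.comp_def]

-- ===== VERDICT (by name: the statement is the Claim_ definition above) =====
theorem csv_or_multi_py_spec : Claim_equal_csv_or_multi_py := by
  intro values _
  unfold Spec_csv_or_multi_py
  rw [a_eq_flatMap, b_eq_flatMap]
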